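-- pv_equiv track=rewrite | github.com/atul4113/eauther | src/libraries/utility/redirect.py | join_redirect_urls
-- ===== SOURCE A (Python) =====
-- def join_redirect_urls(redirect_urls):
--     url = ''
--     for index, redirect_url in enumerate(redirect_urls):
--         if index == 0:
--             url = redirect_url
--         elif index == 1:
--             url = '%s?next=%s' % (url, redirect_url)
--         else:
--             url = '%s&next=%s' % (url, redirect_url)
--     return url
-- ===== SOURCE B (Python) =====
-- def join_redirect_urls(redirect_urls):
--     urls = list(redirect_urls)
--     if not urls:
--         return ''
--     if len(urls) == 1:
--         return urls[0]
--     return '%s?next=%s' % (urls[0], '&next='.join(str(u) for u in urls[1:]))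
-- ===== Notes on version B (the rewrite author's own statement) =====
-- stated objective: faster
-- what changed: Replaces the enumerate loop with its three index branches (which rebuilds the whole accumulator string every iteration) by a head/tail decomposition: empty and singleton cases returned directly, otherwise a single '&next='.join over the tail glued to the head with '?next='.
import Mathlib
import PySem

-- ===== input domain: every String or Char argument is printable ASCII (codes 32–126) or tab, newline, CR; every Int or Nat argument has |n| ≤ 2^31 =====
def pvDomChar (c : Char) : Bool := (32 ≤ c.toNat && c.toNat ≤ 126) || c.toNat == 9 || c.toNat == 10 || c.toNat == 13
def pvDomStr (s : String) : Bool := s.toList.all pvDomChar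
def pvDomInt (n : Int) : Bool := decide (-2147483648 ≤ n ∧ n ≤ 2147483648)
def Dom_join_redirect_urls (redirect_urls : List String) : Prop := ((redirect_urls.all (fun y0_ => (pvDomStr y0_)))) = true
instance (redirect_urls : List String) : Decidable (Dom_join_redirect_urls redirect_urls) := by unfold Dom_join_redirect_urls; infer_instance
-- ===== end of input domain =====

-- B replaces A's enumerate loop (which re-concatenates the accumulator each step)
-- by head/tail decomposition with one '&next='.join over the tail.
-- ===== PORT A =====
def join_redirect_urls (redirect_urls : List String) : String :=
  (PySem.List.enumerate redirect_urls 0).foldl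
    (fun url p =>
      if p.1 = 0 then p.2
      else if p.1 = 1 then url ++ "?next=" ++ p.2
      else url ++ "&next=" ++ p.2) ""

-- ===== PORT B =====
-- literal port of '&next='.join(...) (str() on strings is the identity)
def ampJoin (parts : List String) : String :=
  match parts with
  | [] => ""
  | r :: rs => rs.foldl (fun a x => a ++ "&next=" ++ x) r

def join_redirect_urls_alt (redirect_urls : List String) : String :=
  match redirect_urls with
  | [] => ""
  | [u] => u
  | u :: rest => u ++ "?next=" ++ ampJoin rest

-- ===== PRECONDITION & SPEC =====
def Spec_join_redirect_urls (redirect_urls : List String) (out : String) : Prop := out = join_redirect_urls_alt redirect_urls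
instance (redirect_urls : List String) (out : String) : Decidable (Spec_join_redirect_urls redirect_urls out) := by unfold Spec_join_redirect_urls; infer_instance

-- ===== CLAIM (what is proved, stated in full; the proofs are below) =====
def Claim_equal_join_redirect_urls : Prop := ∀ (redirect_urls : List String), Dom_join_redirect_urls redirect_urls → Spec_join_redirect_urls redirect_urls (join_redirect_urls redirect_urls)

-- ===== LEMMAS AND PROOFS =====

lemma foldl_amp_shift (rs : List String) (p r : String) :
    rs.foldl (fun a x => a ++ "&next=" ++ x) (p ++ r)
      = p ++ rs.foldl (fun a x => a ++ "&next=" ++ x) r := by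
  induction rs generalizing r with
  | nil => rfl
  | cons x rs ih =>
      rw [List.foldl_cons, List.foldl_cons,
        show (p ++ r) ++ "&next=" ++ x = p ++ (r ++ "&next=" ++ x) by
          simp only [String.append_assoc]]
      exact ih (r ++ "&next=" ++ x)

lemma foldl_enum_high (rs : List String) (acc : String) (s : Int) (hs : 2 ≤ s) :
    (PySem.List.enumerate rs s).foldl
      (fun url p =>
        if p.1 = 0 then p.2
        else if p.1 = 1 then url ++ "?next=" ++ p.2
        else url ++ "&next=" ++ p.2) acc
    = rs.foldl (fun a x => a ++ "&next=" ++ x) acc := by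
  induction rs generalizing acc s with
  | nil => simp [PySem.List.enumerate_nil]
  | cons x rs ih =>
      rw [PySem.List.enumerate_cons]
      simp only [List.foldl_cons]
      rw [if_neg (by omega), if_neg (by omega)]
      exact ih _ (s + 1) (by omega)

-- ===== VERDICT (by name: the statement is the Claim_ definition above) =====
theorem join_redirect_urls_spec : Claim_equal_join_redirect_urls := by
  intro xs _
  unfold Spec_join_redirect_urls
  match xs with
  | [] => rfl
  | [u] =>
      simp [join_redirect_urls, join_redirect_urls_alt,
        PySem.List.enumerate_cons, PySem.List.enumerate_nil]
  | u :: r :: rs =>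
      show (PySem.List.enumerate (u :: r :: rs) 0).foldl _ "" = _
      rw [PySem.List.enumerate_cons, PySem.List.enumerate_cons]
      rw [List.foldl_cons, List.foldl_cons]
      norm_num
      rw [foldl_enum_high rs _ 2 (by omega)]
      show List.foldl (fun a x => a ++ "&next=" ++ x) (u ++ "?next=" ++ r) rs
            = u ++ "?next=" ++ ampJoin (r :: rs)
      rw [foldl_amp_shift rs (u ++ "?next=") r]
      rfl
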